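-- pv_equiv track=rewrite | github.com/vakrao/sent | helpers.py | clean_temp_shift
-- ===== SOURCE A (Python) =====
-- days = {1:31,2:28,3:31,4:30,5:31,6:30,7:31,8:31,9:30,10:31,11:30,12:31}
--
-- def clean_temp_shift(i,t_m,cal_month,shifts):
--     month_counter = 0
--     shift_i = []
--     curr_days = 0
--     ord_count = cal_month
--     assert(len(i) > 0 ),"Error: i is too small"
--     while(month_counter < t_m):
--         days_amount = days[ord_count]
--         curr_days += days_amount
--         assert(curr_days <= len(i)), f"Error: curr_days:{curr_days} is greater than length of i: {len(i)}"
--         # this samples the cumulative value for the month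
--         month_value = i[curr_days-1]
--         shift_i.append(month_value)
--         ord_count += 1
--         if ord_count > 12:
--             ord_count = 1
--         month_counter += 1
--     # pop out the shifts
--     shift_i = shift_i[shifts:]
--     clean_t = [i for i in range(0,len(shift_i))]
--     return shift_i,clean_t
-- ===== SOURCE B (Python) =====
-- # Closed-form day offsets via a precomputed annual prefix table + divmod,
-- # replacing A's running totals and month wrap-around register.
-- PREFIX = (0, 31, 59, 90, 120, 151, 181, 212, 243, 273, 304, 334, 365)
--
-- def _F(x):
--     """Total days in the first x months of the (repeating) calendar."""
--     q, r = divmod(x, 12)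
--     return 365 * q + PREFIX[r]
--
-- def clean_temp_shift(i, t_m, cal_month, shifts):
--     assert len(i) > 0, "Error: i is too small"
--     a = cal_month - 1
--     offsets = [_F(a + k) - _F(a) for k in range(1, t_m + 1)]
--     assert all(c <= len(i) for c in offsets), "Error: a day offset exceeds the length of i"
--     shift_i = [i[c - 1] for c in offsets][shifts:]
--     return shift_i, list(range(len(shift_i)))
-- ===== Notes on version B (the rewrite author's own statement) =====
-- stated objective: alternative
-- what changed: Replaces A's stateful accumulation (running day total plus a wrap-around month register updated every iteration) by a closed-form offset formula: a precomputed 13-entry annual prefix-sum table and divmod give each cumulative day offset independently in O(1), so no running state is carried between months.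
import Mathlib
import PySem

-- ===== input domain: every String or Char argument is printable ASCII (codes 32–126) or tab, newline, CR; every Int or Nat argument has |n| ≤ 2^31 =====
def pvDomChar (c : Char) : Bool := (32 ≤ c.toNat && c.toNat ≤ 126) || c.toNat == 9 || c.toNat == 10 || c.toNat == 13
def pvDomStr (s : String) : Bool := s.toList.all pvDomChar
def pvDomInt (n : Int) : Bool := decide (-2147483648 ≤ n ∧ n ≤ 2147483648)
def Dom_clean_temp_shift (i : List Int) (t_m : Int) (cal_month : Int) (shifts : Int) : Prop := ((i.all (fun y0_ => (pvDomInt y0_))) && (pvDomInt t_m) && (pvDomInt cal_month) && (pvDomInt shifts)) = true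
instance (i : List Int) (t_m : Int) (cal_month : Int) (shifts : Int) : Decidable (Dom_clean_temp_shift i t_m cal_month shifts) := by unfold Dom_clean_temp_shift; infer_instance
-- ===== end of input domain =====

-- B replaces A's fused stateful loop (running day total + wrap-around month register) by a
-- closed-form offset formula using a precomputed annual prefix-sum table and divmod; objective: alternative.

-- ===== PORT A =====
-- the module-level `days` table used by A
def daysDict : PySem.Dict Int Int :=
  PySem.Dict.ofList [(1,31),(2,28),(3,31),(4,30),(5,31),(6,30),(7,31),(8,31),(9,30),(10,31),(11,30),(12,31)]

-- days[m]; under Pre_ the key is always present, so the default 0 is never read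
def daysOf (m : Int) : Int := daysDict.getD m 0

-- A's while-loop: state = (remaining fuel, curr_days, ord_count, shift_i)
def loopA (i : List Int) (fuel : Nat) (curr_days ord_count : Int) (shift_i : List Int) : List Int :=
  match fuel with
  | 0 => shift_i
  | f + 1 =>
    let days_amount := daysOf ord_count
    let curr := curr_days + days_amount
    let month_value := (PySem.List.pyGet? i (curr - 1)).getD 0
    let ord' := if ord_count + 1 > 12 then 1 else ord_count + 1
    loopA i f curr ord' (shift_i ++ [month_value])

def clean_temp_shift (i : List Int) (t_m : Int) (cal_month : Int) (shifts : Int) : List Int × List Int :=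
  let shift_i := loopA i t_m.toNat 0 cal_month []
  let shift_i := PySem.List.slice shift_i (some shifts) none
  (shift_i, PySem.List.pyRange 0 shift_i.length 1)

-- ===== PORT B =====
-- B's module-level PREFIX table
def prefixT : List Int := [0, 31, 59, 90, 120, 151, 181, 212, 243, 273, 304, 334, 365]

-- B's _F: total days in the first x months of the (repeating) calendar, via divmod(x, 12)
def fdays (x : Int) : Int :=
  365 * PySem.Int.floordiv x 12 + (PySem.List.pyGet? prefixT (PySem.Int.mod x 12)).getD 0

def clean_temp_shift_alt (i : List Int) (t_m : Int) (cal_month : Int) (shifts : Int) : List Int × List Int :=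
  let a := cal_month - 1
  let offsets := (PySem.List.pyRange 1 (t_m + 1) 1).map (fun k => fdays (a + k) - fdays a)
  let sampled := offsets.map (fun c => (PySem.List.pyGet? i (c - 1)).getD 0)
  let shift_i := PySem.List.slice sampled (some shifts) none
  (shift_i, PySem.List.pyRange 0 shift_i.length 1)

-- ===== PRECONDITION & SPEC =====
-- total days of the first t months starting at month cal (used only to state Pre_)
def cumDays (cal : Int) (t : Nat) : Int :=
  ((List.range t).map (fun k => daysOf (PySem.Int.mod (cal - 1 + k) 12 + 1))).sum

-- Pre_ = exactly the inputs on which A returns: i nonempty, and when t_m > 0 the start month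
-- is a valid key 1..12 and every cumulative day offset fits inside i (offsets increase, so the
-- total suffices; t_m ≤ len i is implied and bounds the cumDays computation).
def Pre_clean_temp_shift (i : List Int) (t_m : Int) (cal_month : Int) (shifts : Int) : Prop :=
  i ≠ [] ∧ (0 < t_m → (1 ≤ cal_month ∧ cal_month ≤ 12) ∧ t_m ≤ (i.length : Int) ∧
    cumDays cal_month (min t_m.toNat i.length) ≤ (i.length : Int))
instance (i : List Int) (t_m : Int) (cal_month : Int) (shifts : Int) : Decidable (Pre_clean_temp_shift i t_m cal_month shifts) := by unfold Pre_clean_temp_shift; infer_instance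

def pvWitness_clean_temp_shift : List Int × Int × Int × Int :=
  ([7, 2, 3, 4, 5, 6, 7, 8, 9, 10, 11, 12, 13, 14, 15, 16, 17, 18, 19, 20, 21, 22, 23, 24, 25, 26, 27, 28, 29, 30, 42], 1, 1, 0)

def Spec_clean_temp_shift (i : List Int) (t_m : Int) (cal_month : Int) (shifts : Int) (out : List Int × List Int) : Prop := out = clean_temp_shift_alt i t_m cal_month shifts
instance (i : List Int) (t_m : Int) (cal_month : Int) (shifts : Int) (out : List Int × List Int) : Decidable (Spec_clean_temp_shift i t_m cal_month shifts out) := by unfold Spec_clean_temp_shift; infer_instance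

-- ===== CLAIM =====
def Claim_equal_clean_temp_shift : Prop := ∀ (i : List Int) (t_m : Int) (cal_month : Int) (shifts : Int), Dom_clean_temp_shift i t_m cal_month shifts → Pre_clean_temp_shift i t_m cal_month shifts → Spec_clean_temp_shift i t_m cal_month shifts (clean_temp_shift i t_m cal_month shifts)

-- ===== LEMMAS AND PROOFS =====

-- the prefix table steps by exactly the month lengths
theorem tstep (r : Int) (h0 : 0 ≤ r) (h1 : r < 12) :
    (PySem.List.pyGet? prefixT (r + 1)).getD 0 =
      (PySem.List.pyGet? prefixT r).getD 0 + daysOf (r + 1) := by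
  interval_cases r <;> decide

-- B's closed form steps by one month length
theorem fdays_succ (m : Int) :
    fdays (m + 1) = fdays m + daysOf (m % 12 + 1) := by
  have h12 : (0:Int) < 12 := by norm_num
  have hfe : ∀ x : Int, PySem.Int.floordiv x 12 = x / 12 :=
    fun x => PySem.Int.floordiv_eq_ediv_of_pos h12
  have hme : ∀ x : Int, PySem.Int.mod x 12 = x % 12 :=
    fun x => PySem.Int.mod_eq_emod_of_pos h12
  have hr0 : 0 ≤ m % 12 := Int.emod_nonneg _ (by norm_num)
  have hr1 : m % 12 < 12 := Int.emod_lt_of_pos _ h12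
  have ht := tstep (m % 12) hr0 hr1
  simp only [fdays, hfe, hme]
  by_cases hc : m % 12 = 11
  · have e1 : (m + 1) % 12 = 0 := by omega
    have e2 : (m + 1) / 12 = m / 12 + 1 := by omega
    rw [e1, e2, hc]
    rw [hc] at ht
    have p0 : ((PySem.List.pyGet? prefixT 0).getD 0 : Int) = 0 := by decide
    have ht' : ((PySem.List.pyGet? prefixT (11 + 1)).getD 0 : Int) = 365 := by decide
    rw [ht'] at ht
    rw [p0]
    linarith
  · have e1 : (m + 1) % 12 = m % 12 + 1 := by omega
    have e2 : (m + 1) / 12 = m / 12 := by omega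
    rw [e1, e2, ht]
    ring

-- A's loop samples at B's closed-form offsets
theorem loopA_eq (i : List Int) : ∀ (fuel : Nat) (m curr : Int) (acc : List Int),
    loopA i fuel curr (m % 12 + 1) acc =
      acc ++ (List.range fuel).map
        (fun k : Nat => (PySem.List.pyGet? i (curr + fdays (m + k + 1) - fdays m - 1)).getD 0) := by
  intro fuel
  induction fuel with
  | zero => intro m curr acc; simp [loopA]
  | succ f ih =>
    intro m curr acc
    have hds : daysOf (m % 12 + 1) = fdays (m + 1) - fdays m := by
      have := fdays_succ m; linarith
    have hord : (if m % 12 + 1 + 1 > 12 then (1:Int) else m % 12 + 1 + 1) = (m + 1) % 12 + 1 := by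
      split_ifs with h <;> omega
    rw [List.range_succ_eq_map, List.map_cons, List.map_map]
    simp only [loopA]
    rw [hds, hord, ih (m + 1) (curr + (fdays (m + 1) - fdays m))]
    simp only [List.append_assoc, List.singleton_append]
    congr 2
    · congr 1
      ring
    · refine List.map_congr_left (fun k _ => ?_)
      simp only [Function.comp_def, Nat.succ_eq_add_one]
      push_cast
      ring_nf

theorem clean_temp_shift_spec : Claim_equal_clean_temp_shift := by
  unfold Claim_equal_clean_temp_shift
  intro i t_m cal_month shifts _ hpre
  unfold Spec_clean_temp_shift clean_temp_shift clean_temp_shift_alt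
  rcases hpre with ⟨_, hpos⟩
  by_cases ht : 0 < t_m
  · obtain ⟨⟨hc1, hc2⟩, _, _⟩ := hpos ht
    have hcm : cal_month = (cal_month - 1) % 12 + 1 := by omega
    have hA := loopA_eq i t_m.toNat (cal_month - 1) 0 []
    rw [← hcm] at hA
    rw [hA]
    rw [PySem.List.pyRange_one]
    have hn : (t_m + 1 - 1).toNat = t_m.toNat := by omega
    rw [hn]
    simp only [List.nil_append, List.map_map, Function.comp_def]
    have hmap :
        List.map (fun k : Nat => (PySem.List.pyGet? i (0 + fdays (cal_month - 1 + (k:Int) + 1) - fdays (cal_month - 1) - 1)).getD 0) (List.range t_m.toNat)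
          = List.map (fun k : Nat => (PySem.List.pyGet? i (fdays (cal_month - 1 + (1 + (k:Int))) - fdays (cal_month - 1) - 1)).getD 0) (List.range t_m.toNat) := by
      refine List.map_congr_left (fun k _ => ?_)
      rw [show cal_month - 1 + (k:Int) + 1 = cal_month - 1 + (1 + (k:Int)) from by ring]
      norm_num
    rw [hmap]
  · have h0 : t_m.toNat = 0 := by omega
    rw [h0, PySem.List.pyRange_one_eq_nil (by omega : t_m + 1 ≤ 1)]
    simp [loopA]
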